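-- pv_equiv track=rewrite | github.com/brianjp93/aoc2019 | day04/day4.py | has_same_adj
-- ===== SOURCE A (Python) =====
-- def has_same_adj(num, run_length=2, extra=True):
--     num_str = str(num)
--     counts = []
--     for c in num_str:
--         if len(counts) > 0 and counts[-1][0] == c:
--             counts[-1][1] += 1
--         else:
--             counts.append([c, 1])
--         if extra:
--             if counts[-1][1] >= 2:
--                 return True
--         else:
--             if len(counts) >= 2 and counts[-2][1] == 2:
--                 return True
--     if not extra:
--         if counts[-1][1] == 2:
--             return True
--     return False
-- ===== SOURCE B (Python) =====
-- def has_same_adj(num, run_length=2, extra=True):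
--     s = str(num)
--     if extra:
--         return any(a == b for a, b in zip(s, s[1:]))
--     t = [None] + list(s) + [None]
--     return any(w != x and x == y and y != z
--                for w, x, y, z in zip(t, t[1:], t[2:], t[3:]))
-- ===== Notes on version B (the rewrite author's own statement) =====
-- stated objective: alternative
-- what changed: Replaces A's run-length-encoding pass (mutable counts list, interleaved early returns, tail fixup) with a purely local sliding-window scan: any adjacent equal pair for extra=True, and a sentinel-padded 4-wide window test w != x == y != z for extra=False, so no run lengths are ever counted.
import Mathlib
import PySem

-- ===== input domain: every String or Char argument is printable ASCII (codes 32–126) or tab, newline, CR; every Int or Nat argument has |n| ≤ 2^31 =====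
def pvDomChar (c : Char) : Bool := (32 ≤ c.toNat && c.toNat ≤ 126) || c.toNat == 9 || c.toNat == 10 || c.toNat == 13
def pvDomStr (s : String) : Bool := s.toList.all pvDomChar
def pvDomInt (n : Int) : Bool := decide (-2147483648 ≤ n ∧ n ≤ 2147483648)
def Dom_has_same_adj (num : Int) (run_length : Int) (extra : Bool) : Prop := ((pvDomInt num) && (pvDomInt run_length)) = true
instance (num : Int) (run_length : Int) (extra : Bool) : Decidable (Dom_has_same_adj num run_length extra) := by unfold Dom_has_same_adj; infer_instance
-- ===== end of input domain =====

-- B drops A's run-count bookkeeping entirely: extra=True is an adjacent-pair equality scan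
-- (zip of shifted strings), extra=False a sentinel-padded 4-wide window test w≠x==y≠z (alternative).


-- ===== PORT A =====
-- A's loop over str(num); `counts` is kept most-recent-first (head = Python's counts[-1],
-- second = counts[-2]); the early `return True`s become the `if … then true` branches.
def hsaLoop (extra : Bool) (counts : List (Char × Int)) (cs : List Char) : Bool :=
  match cs with
  | [] =>
    -- after the loop: `if not extra: if counts[-1][1] == 2: return True`; counts is never
    -- empty here when called from the entry point (str(num) is nonempty)
    if !extra then
      match counts with
      | (_, n) :: _ => n == 2
      | [] => false
    else false
  | c :: rest =>
    let counts' :=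
      match counts with
      | (c0, n) :: tl => if c0 == c then (c0, n + 1) :: tl else (c, 1) :: (c0, n) :: tl
      | [] => [(c, 1)]
    if extra then
      if 2 ≤ (counts'.headD ('?', 0)).2 then true else hsaLoop extra counts' rest
    else
      if (match counts' with | _ :: (_, n2) :: _ => n2 == 2 | _ => false) then true
      else hsaLoop extra counts' rest

def has_same_adj (num : Int) (run_length : Int) (extra : Bool) : Bool :=
  hsaLoop extra [] (PySem.Int.toStr num).toList

-- ===== PORT B =====
-- zip(t, t[1:], t[2:], t[3:]) of Source B: the sliding 4-windows of t
def hsbQuads : List (Option Char) → List (Option Char × Option Char × Option Char × Option Char)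
  | w :: x :: y :: z :: rest => (w, x, y, z) :: hsbQuads (x :: y :: z :: rest)
  | _ => []

-- the window test `w != x and x == y and y != z` of Source B
def hsbWin (q : Option Char × Option Char × Option Char × Option Char) : Bool :=
  q.1 != q.2.1 && q.2.1 == q.2.2.1 && q.2.2.1 != q.2.2.2

def has_same_adj_alt (num : Int) (run_length : Int) (extra : Bool) : Bool :=
  let s := (PySem.Int.toStr num).toList
  if extra then (s.zip s.tail).any (fun p => p.1 == p.2)
  else
    let t : List (Option Char) := none :: s.map some ++ [none]
    (hsbQuads t).any hsbWin

-- ===== PRECONDITION & SPEC =====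
def Spec_has_same_adj (num : Int) (run_length : Int) (extra : Bool) (out : Bool) : Prop := out = has_same_adj_alt num run_length extra
instance (num : Int) (run_length : Int) (extra : Bool) (out : Bool) : Decidable (Spec_has_same_adj num run_length extra out) := by unfold Spec_has_same_adj; infer_instance

-- ===== CLAIM (what is proved, stated in full; the proofs are below) =====
def Claim_equal_has_same_adj : Prop := ∀ (num : Int) (run_length : Int) (extra : Bool), Dom_has_same_adj num run_length extra → Spec_has_same_adj num run_length extra (has_same_adj num run_length extra)

-- ===== LEMMAS AND PROOFS =====

-- proof-only intermediate: the consecutive run lengths of a character list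
def hsbRunsFrom (c0 : Char) (n : Int) : List Char → List Int
  | [] => [n]
  | c :: cs => if c == c0 then hsbRunsFrom c0 (n + 1) cs else n :: hsbRunsFrom c 1 cs

-- the first run length produced by hsbRunsFrom is at least its accumulator
theorem hsbRunsFrom_any_ge (cs : List Char) (c0 : Char) (n : Int) (h : 2 ≤ n) :
    (hsbRunsFrom c0 n cs).any (fun L => 2 ≤ L) = true := by
  induction cs generalizing c0 n with
  | nil => simp [hsbRunsFrom]; omega
  | cons c cs ih =>
    simp only [hsbRunsFrom]
    split
    · exact ih c0 (n + 1) (by omega)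
    · simp; left; omega

-- A side, extra = True: with a fresh current run of length 1 on top the loop decides
-- "some run of c0^1 ++ cs has length ≥ 2"
theorem hsaLoop_true (cs : List Char) (c0 : Char) (tl : List (Char × Int)) :
    hsaLoop true ((c0, 1) :: tl) cs = (hsbRunsFrom c0 1 cs).any (fun L => 2 ≤ L) := by
  induction cs generalizing c0 tl with
  | nil => simp [hsaLoop, hsbRunsFrom]
  | cons c cs ih =>
    simp only [hsaLoop, hsbRunsFrom]
    by_cases hc : c0 = c
    · subst hc
      simp [hsbRunsFrom_any_ge cs c0 2 (by omega)]
    · have hc' : (c0 == c) = false := by simp [hc]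
      have hc'' : (c == c0) = false := by simp [Ne.symm hc]
      simp [hc', hc'', ih]

-- headSafe: the most recently closed run does not have length 2 (else A would have returned)
def hsHeadSafe : List (Char × Int) → Prop
  | (_, n2) :: _ => (n2 == 2) = false
  | [] => True

-- A side, extra = False: the loop decides "some run of c0^n ++ cs has length exactly 2"
theorem hsaLoop_false (cs : List Char) (c0 : Char) (n : Int) (tl : List (Char × Int))
    (htl : hsHeadSafe tl) :
    hsaLoop false ((c0, n) :: tl) cs = (hsbRunsFrom c0 n cs).any (fun L => L == 2) := by
  induction cs generalizing c0 n tl with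
  | nil => simp [hsaLoop, hsbRunsFrom]
  | cons c cs ih =>
    simp only [hsaLoop, hsbRunsFrom]
    by_cases hc : c0 = c
    · subst hc
      have h2 : (match ((c0, n + 1) :: tl : List (Char × Int)) with
          | _ :: (_, n2) :: _ => n2 == 2 | _ => false) = false := by
        match tl, htl with
        | [], _ => rfl
        | (d, n2) :: tl', h => simpa [hsHeadSafe] using h
      simp [h2, ih c0 (n + 1) tl htl]
    · have hc' : (c0 == c) = false := by simp [hc]
      have hc'' : (c == c0) = false := by simp [Ne.symm hc]
      by_cases hn : n = 2
      · subst hn; simp [hc', hc'']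
      · have hn' : ((n : Int) == 2) = false := by simp [hn]
        simp [hc', hc'', hn', ih c 1 ((c0, n) :: tl) (by simpa [hsHeadSafe] using hn')]

-- B side, extra = True: the adjacent-pair scan decides "some run has length ≥ 2"
theorem pairs_eq (rest : List Char) (c : Char) :
    (((c :: rest).zip rest).any (fun p => p.1 == p.2)) =
      (hsbRunsFrom c 1 rest).any (fun L => 2 ≤ L) := by
  induction rest generalizing c with
  | nil => simp [hsbRunsFrom]
  | cons d rest ih =>
    simp only [List.zip_cons_cons, List.any_cons, hsbRunsFrom]
    by_cases hd : d = c
    · subst hd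
      simp [hsbRunsFrom_any_ge rest d 2 (by omega)]
    · have hd' : (d == c) = false := by simp [hd]
      have hd'' : (c == d) = false := by simp [Ne.symm hd]
      simp [hd', hd'', ih d]

-- (any L == 2) over runs is insensitive to the exact accumulator once it is ≥ 3
theorem runs_ge3_irrel (rest : List Char) (c : Char) (n m : Int) (hn : 3 ≤ n) (hm : 3 ≤ m) :
    (hsbRunsFrom c n rest).any (fun L => L == 2) =
      (hsbRunsFrom c m rest).any (fun L => L == 2) := by
  induction rest generalizing n m with
  | nil =>
    have h1 : ((n : Int) == 2) = false := by simp; omega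
    have h2 : ((m : Int) == 2) = false := by simp; omega
    simp [hsbRunsFrom, h1, h2]
  | cons d rest ih =>
    simp only [hsbRunsFrom]
    split
    · exact ih (n + 1) (m + 1) (by omega) (by omega)
    · have h1 : ((n : Int) == 2) = false := by simp; omega
      have h2 : ((m : Int) == 2) = false := by simp; omega
      simp [h1, h2]

-- the combined window-scan invariant, by strong induction on the remaining suffix:
--  (L) below a boundary (prev ≠ current char), the window scan decides "a run of c^1++rest is exactly 2";
--  (M) inside a run of length ≥ 2 of c, likewise with the run already too long to count
theorem quadLM (k : Nat) :
    ∀ rest : List Char, rest.length ≤ k →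
      ((∀ (c : Char) (prev : Option Char), prev ≠ some c →
          (hsbQuads (prev :: some c :: rest.map some ++ [none])).any hsbWin =
            (hsbRunsFrom c 1 rest).any (fun L => L == 2)) ∧
       (∀ c : Char,
          (hsbQuads (some c :: some c :: rest.map some ++ [none])).any hsbWin =
            (hsbRunsFrom c 3 rest).any (fun L => L == 2))) := by
  induction k with
  | zero =>
    intro rest hlen
    have : rest = [] := List.length_eq_zero_iff.mp (Nat.le_zero.mp hlen)
    subst this
    constructor
    · intro c prev _; simp [hsbQuads, hsbRunsFrom]
    · intro c; simp [hsbQuads, hsbRunsFrom]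
  | succ k ih =>
    intro rest hlen
    match rest with
    | [] =>
      constructor
      · intro c prev _; simp [hsbQuads, hsbRunsFrom]
      · intro c; simp [hsbQuads, hsbRunsFrom]
    | [d] =>
      constructor
      · intro c prev hprev
        have hp : (prev != some c) = true := by simp [bne_iff_ne, hprev]
        by_cases hd : d = c
        · simp only [hd]
          simp [hsbQuads, hsbWin, hsbRunsFrom, hp]
        · have hd' : (d == c) = false := by simp [hd]
          have hc' : (c == d) = false := by simp [Ne.symm hd]
          simp [hsbQuads, hsbWin, hsbRunsFrom, hd', hc', hp]
      · intro c
        by_cases hd : d = c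
        · simp only [hd]; simp [hsbQuads, hsbWin, hsbRunsFrom]
        · have hd' : (d == c) = false := by simp [hd]
          simp [hsbQuads, hsbWin, hsbRunsFrom, hd']
    | d :: e :: rest3 =>
      have hlen3 : rest3.length + 1 ≤ k := by simpa using Nat.succ_le_succ_iff.mp (by simpa using hlen)
      constructor
      · intro c prev hprev
        have hp : (prev != some c) = true := by simp [bne_iff_ne, hprev]
        by_cases hd : d = c
        · simp only [hd] at *
          by_cases he : e = c
          · -- prev | c c c … : first window fails (y = z); tail is M on (c :: rest3)
            simp only [he] at *
            have hM := ((ih (c :: rest3) (by simpa using hlen3)).2) c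
            simp only [List.map_cons, List.cons_append, List.any_cons] at hM ⊢
            simp only [hsbQuads, List.any_cons] at hM ⊢
            simp only [hsbWin, hsbRunsFrom]
            simp only [hsbRunsFrom] at hM
            simp [hM, runs_ge3_irrel rest3 c 4 3 (by omega) (by omega)]
          · -- prev | c c e … with e ≠ c : exact run of 2 found by the first window
            have he' : (e == c) = false := by simp [he]
            have he'' : (some c != some e) = true := by simp [bne_iff_ne, Ne.symm he]
            simp [hsbQuads, hsbWin, hsbRunsFrom, hp, he', he'']
        · -- prev | c d … with d ≠ c : first window fails (x ≠ y); tail is L at the new boundary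
          have hd' : (d == c) = false := by simp [hd]
          have hc' : (c == d) = false := by simp [Ne.symm hd]
          have hL := ((ih (e :: rest3) hlen3).1) d (some c) (by simpa using Ne.symm hd)
          simp only [List.map_cons, List.cons_append, hsbQuads, List.any_cons] at hL ⊢
          simp only [hsbWin, hsbRunsFrom] at hL ⊢
          simp [hc', hd', hL]
      · intro c
        by_cases hd : d = c
        · simp only [hd] at *
          by_cases he : e = c
          · simp only [he] at *
            have hM := ((ih (c :: rest3) (by simpa using hlen3)).2) c
            simp only [List.map_cons, List.cons_append, hsbQuads, List.any_cons] at hM ⊢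
            simp only [hsbWin, hsbRunsFrom] at hM ⊢
            simp [hM, runs_ge3_irrel rest3 c 5 3 (by omega) (by omega),
                  runs_ge3_irrel rest3 c 4 3 (by omega) (by omega)]
          · have he' : (e == c) = false := by simp [he]
            have hL := ((ih rest3 (by omega)).1) e (some c) (by simpa using Ne.symm he)
            cases rest3 with
            | nil => simp [hsbQuads, hsbWin, hsbRunsFrom, he']
            | cons f rest4 =>
              simp only [List.map_cons, List.cons_append, hsbQuads, List.any_cons] at hL ⊢
              simp only [hsbWin, hsbRunsFrom] at hL ⊢
              simp [he', hL]
        · have hd' : (d == c) = false := by simp [hd]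
          have hL := ((ih (e :: rest3) hlen3).1) d (some c) (by simpa using Ne.symm hd)
          simp only [List.map_cons, List.cons_append, hsbQuads, List.any_cons] at hL ⊢
          simp only [hsbWin, hsbRunsFrom] at hL ⊢
          simp [hd', hL]

-- the entry points agree for every character list and flag
theorem hsa_main (cs : List Char) (extra : Bool) :
    hsaLoop extra [] cs =
      (if extra then ((cs.zip cs.tail).any (fun p => p.1 == p.2))
       else (hsbQuads (none :: cs.map some ++ [none])).any hsbWin) := by
  cases cs with
  | nil => cases extra <;> simp [hsaLoop, hsbQuads]
  | cons c rest =>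
    cases extra with
    | true =>
      simpa [hsaLoop, hsbRunsFrom] using (hsaLoop_true rest c []).trans (pairs_eq rest c).symm
    | false =>
      have hL := ((quadLM rest.length rest le_rfl).1) c none (by simp)
      simpa [hsaLoop, hsbRunsFrom] using (hsaLoop_false rest c 1 [] trivial).trans hL.symm

-- ===== VERDICT (by name: the statement is the Claim_ definition above) =====
theorem has_same_adj_spec : Claim_equal_has_same_adj := by
  intro num run_length extra _
  unfold Spec_has_same_adj has_same_adj has_same_adj_alt
  simpa using hsa_main (PySem.Int.toStr num).toList extra
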